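-- pv_equiv track=rewrite | github.com/AniaMest/skyrim-race-chooser | main.py | evaluate_races
-- ===== SOURCE A (Python) =====
-- def evaluate_races(races, chosen_skills):
--
--     scores = {}
--     for race in races:
--         scores[race] = 0
--
--     for skill in chosen_skills:
--         for race, race_skill_value in races.items():
--
--             skill_value = race_skill_value.get(skill, 15)
--
--             if skill_value == 25:
--                 scores[race] += 3
--             elif skill_value == 20:
--                 scores[race] += 2
--             else:
--                 scores[race] += 1
--     return scores
-- ===== SOURCE B (Python) =====
-- def evaluate_races(races, chosen_skills):
--     counts = {}
--     for s in chosen_skills: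
--         counts[s] = counts.get(s, 0) + 1
--     base = len(chosen_skills)
--     scores = {}
--     for race, skill_map in races.items():
--         bonus = 0
--         for skill, value in skill_map.items():
--             if value == 25:
--                 bonus += 2 * counts.get(skill, 0)
--             elif value == 20:
--                 bonus += counts.get(skill, 0)
--         scores[race] = base + bonus
--     return scores
-- ===== Notes on version B (the rewrite author's own statement) =====
-- stated objective: faster
-- what changed: B builds a Counter of chosen_skills once and then, per race, iterates over the race's own skill dict entries adding bonus*count for 25/20-valued skills to the baseline len(chosen_skills), so the inner scan over chosen_skills disappears.
import Mathlib
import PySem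

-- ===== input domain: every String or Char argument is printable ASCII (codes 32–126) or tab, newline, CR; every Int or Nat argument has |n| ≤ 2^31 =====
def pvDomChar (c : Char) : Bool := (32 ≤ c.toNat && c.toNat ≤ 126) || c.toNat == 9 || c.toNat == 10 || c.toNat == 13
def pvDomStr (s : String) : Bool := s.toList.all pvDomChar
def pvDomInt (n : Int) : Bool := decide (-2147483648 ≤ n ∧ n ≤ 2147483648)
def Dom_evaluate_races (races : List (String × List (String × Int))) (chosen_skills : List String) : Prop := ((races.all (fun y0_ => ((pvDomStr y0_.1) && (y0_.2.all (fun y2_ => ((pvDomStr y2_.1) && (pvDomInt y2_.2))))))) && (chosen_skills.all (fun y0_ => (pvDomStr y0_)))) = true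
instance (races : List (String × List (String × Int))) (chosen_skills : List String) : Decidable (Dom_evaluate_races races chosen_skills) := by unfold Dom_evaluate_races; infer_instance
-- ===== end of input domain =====

-- B builds a Counter of chosen_skills once and scores each race by iterating over that race's
-- own skill-dict entries (bonus*count added to the baseline len(chosen_skills)), removing the
-- inner scan over chosen_skills that A performs for every race.


-- ===== PORT A =====
def evaluate_races (races : List (String × List (String × Int))) (chosen_skills : List String) : List (String × Int) :=
  let scores0 : PySem.Dict String Int :=
    races.foldl (fun scores race => scores.insert race.1 0) PySem.Dict.empty
  let scores : PySem.Dict String Int :=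
    chosen_skills.foldl (fun scores skill =>
      races.foldl (fun scores race =>
        let skill_value := (PySem.Dict.ofList race.2).getD skill 15
        if skill_value = 25 then scores.insert race.1 (scores.getD race.1 0 + 3)
        else if skill_value = 20 then scores.insert race.1 (scores.getD race.1 0 + 2)
        else scores.insert race.1 (scores.getD race.1 0 + 1)) scores) scores0
  scores.items

-- ===== PORT B =====
def evaluate_races_alt (races : List (String × List (String × Int))) (chosen_skills : List String) : List (String × Int) :=
  let counts : PySem.Dict String Int :=
    chosen_skills.foldl (fun d s => d.insert s (d.getD s 0 + 1)) PySem.Dict.empty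
  let base : Int := chosen_skills.length
  (races.foldl (fun scores race =>
      let skill_map := PySem.Dict.ofList race.2
      let bonus : Int := skill_map.items.foldl (fun (b : Int) p =>
          if p.2 = 25 then b + 2 * counts.getD p.1 0
          else if p.2 = 20 then b + counts.getD p.1 0
          else b) 0
      scores.insert race.1 (base + bonus))
    PySem.Dict.empty).items

-- ===== PRECONDITION & SPEC =====
-- Pre_ excludes races lists with duplicate race names: in Python 'races' is a dict, which cannot hold
-- duplicate keys (a duplicate-keyed association list does not represent any distinct Python input:
-- Python collapses the duplicates, so the association-list ports would diverge from the Python there).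
def Pre_evaluate_races (races : List (String × List (String × Int))) (chosen_skills : List String) : Prop :=
  (races.map Prod.fst).Nodup
instance (races : List (String × List (String × Int))) (chosen_skills : List String) : Decidable (Pre_evaluate_races races chosen_skills) := by unfold Pre_evaluate_races; infer_instance

def pvWitness_evaluate_races : (List (String × List (String × Int))) × List String :=
  ([("Nord", [("TwoHanded", 25)]), ("Elf", [("Magic", 20)])], ["TwoHanded", "Sneak"])

def Spec_evaluate_races (races : List (String × List (String × Int))) (chosen_skills : List String) (out : List (String × Int)) : Prop := out = evaluate_races_alt races chosen_skills
instance (races : List (String × List (String × Int))) (chosen_skills : List String) (out : List (String × Int)) : Decidable (Spec_evaluate_races races chosen_skills out) := by unfold Spec_evaluate_races; infer_instance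

-- ===== CLAIM (what is proved, stated in full; the proofs are below) =====
def Claim_equal_evaluate_races : Prop := ∀ (races : List (String × List (String × Int))) (chosen_skills : List String), Dom_evaluate_races races chosen_skills → Pre_evaluate_races races chosen_skills → Spec_evaluate_races races chosen_skills (evaluate_races races chosen_skills)

-- ===== LEMMAS AND PROOFS =====

-- points one skill contributes to one race in A
def pvPts (m : PySem.Dict String Int) (s : String) : Int :=
  if m.getD s 15 = 25 then 3 else if m.getD s 15 = 20 then 2 else 1

-- the bonus (points above the baseline 1) a skill value carries
def pvBonus (v : Int) : Int := if v = 25 then 2 else if v = 20 then 1 else 0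

lemma pvPts_eq (m : PySem.Dict String Int) (s : String) :
    pvPts m s = 1 + pvBonus (m.getD s 15) := by
  simp only [pvPts, pvBonus]
  split_ifs <;> omega

-- A's inner loop body, written with pvPts
lemma pv_innerA_eq (sk : String) :
    (fun (scores : PySem.Dict String Int) (race : String × List (String × Int)) =>
      let skill_value := (PySem.Dict.ofList race.2).getD sk 15
      if skill_value = 25 then scores.insert race.1 (scores.getD race.1 0 + 3)
      else if skill_value = 20 then scores.insert race.1 (scores.getD race.1 0 + 2)
      else scores.insert race.1 (scores.getD race.1 0 + 1))
    = fun scores race => scores.insert race.1 (scores.getD race.1 0 + pvPts (PySem.Dict.ofList race.2) sk) := by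
  funext scores race
  simp only [pvPts]
  split_ifs <;> rfl

-- a key not named in l is untouched by A's inner loop
lemma pv_untouched (sk : String) (l : List (String × List (String × Int)))
    (d : PySem.Dict String Int) (r : String) (h : r ∉ l.map Prod.fst) :
    (l.foldl (fun scores race => scores.insert race.1 (scores.getD race.1 0 + pvPts (PySem.Dict.ofList race.2) sk)) d).getD r 0
      = d.getD r 0 := by
  induction l generalizing d with
  | nil => rfl
  | cons q rest ih =>
    simp only [List.map_cons, List.mem_cons, not_or] at h
    simp only [List.foldl_cons]
    rw [ih _ h.2, PySem.Dict.getD_insert_of_ne _ _ _ h.1]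

-- one pass of A's inner loop adds pvPts to each listed race
lemma pv_one_skill (sk : String) (l : List (String × List (String × Int)))
    (d : PySem.Dict String Int) (p : String × List (String × Int))
    (hp : p ∈ l) (hnd : (l.map Prod.fst).Nodup) :
    (l.foldl (fun scores race => scores.insert race.1 (scores.getD race.1 0 + pvPts (PySem.Dict.ofList race.2) sk)) d).getD p.1 0
      = d.getD p.1 0 + pvPts (PySem.Dict.ofList p.2) sk := by
  induction l generalizing d with
  | nil => cases hp
  | cons q rest ih =>
    simp only [List.map_cons, List.nodup_cons] at hnd
    simp only [List.foldl_cons]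
    rcases List.mem_cons.mp hp with h | h
    · subst h
      rw [pv_untouched sk rest _ _ hnd.1, PySem.Dict.getD_insert_self]
    · have hne : p.1 ≠ q.1 := by
        intro he; exact hnd.1 (he ▸ List.mem_map_of_mem h)
      rw [ih _ h hnd.2, PySem.Dict.getD_insert_of_ne _ _ _ hne]

-- the whole skill loop adds the sum of pvPts
lemma pv_skills (skills : List String) (races : List (String × List (String × Int)))
    (d : PySem.Dict String Int) (p : String × List (String × Int))
    (hp : p ∈ races) (hnd : (races.map Prod.fst).Nodup) :
    (skills.foldl (fun scores sk =>
        races.foldl (fun scores race => scores.insert race.1 (scores.getD race.1 0 + pvPts (PySem.Dict.ofList race.2) sk)) scores) d).getD p.1 0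
      = d.getD p.1 0 + (skills.map (pvPts (PySem.Dict.ofList p.2))).sum := by
  induction skills generalizing d with
  | nil => simp
  | cons sk rest ih =>
    simp only [List.foldl_cons, List.map_cons, List.sum_cons]
    rw [ih _ , pv_one_skill sk races d p hp hnd]
    ring

-- the initialisation loop puts 0 at every listed key
lemma pv_init_untouched (l : List (String × List (String × Int)))
    (d : PySem.Dict String Int) (r : String) (h : r ∉ l.map Prod.fst) :
    (l.foldl (fun scores race => scores.insert race.1 (0 : Int)) d).getD r 0 = d.getD r 0 := by
  induction l generalizing d with
  | nil => rfl
  | cons q rest ih =>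
    simp only [List.map_cons, List.mem_cons, not_or] at h
    simp only [List.foldl_cons]
    rw [ih _ h.2, PySem.Dict.getD_insert_of_ne _ _ _ h.1]

lemma pv_init (l : List (String × List (String × Int)))
    (d : PySem.Dict String Int) (p : String × List (String × Int))
    (hp : p ∈ l) (hnd : (l.map Prod.fst).Nodup) :
    (l.foldl (fun scores race => scores.insert race.1 (0 : Int)) d).getD p.1 0 = 0 := by
  induction l generalizing d with
  | nil => cases hp
  | cons q rest ih =>
    simp only [List.map_cons, List.nodup_cons] at hnd
    simp only [List.foldl_cons]
    rcases List.mem_cons.mp hp with h | h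
    · subst h
      rw [pv_init_untouched rest _ _ hnd.1, PySem.Dict.getD_insert_self]
    · exact ih _ h hnd.2

-- Set.update absorbs elements already present
lemma pv_update_absorb (s : PySem.Set String) (l : List String) (h : ∀ y ∈ l, y ∈ s) :
    PySem.Set.update s l = s := by
  rw [PySem.Set.update_eq_append_filter]
  have : ((PySem.Set.ofList l).filter (fun y => !(PySem.Set.contains s y))) = [] := by
    rw [List.filter_eq_nil_iff]
    intro y hy
    have : y ∈ s := h y ((PySem.Set.mem_ofList _ _).mp hy)
    simp [PySem.Set.contains_eq_listContains, this]
  rw [this, List.append_nil]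

-- keys of A's score dict are exactly the race names, in order
lemma pv_keys (skills : List String) (races : List (String × List (String × Int)))
    (hnd : (races.map Prod.fst).Nodup) :
    (skills.foldl (fun scores sk =>
        races.foldl (fun scores race => scores.insert race.1 (scores.getD race.1 0 + pvPts (PySem.Dict.ofList race.2) sk)) scores)
      (races.foldl (fun scores race => scores.insert race.1 (0 : Int)) PySem.Dict.empty)).keys
      = races.map Prod.fst := by
  have h0 : (races.foldl (fun scores race => scores.insert race.1 (0 : Int)) PySem.Dict.empty).keys
      = races.map Prod.fst := by
    rw [PySem.Dict.keys_foldl_insert_key races Prod.fst _ PySem.Dict.empty]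
    simp only [PySem.Dict.keys_empty]
    rw [PySem.Set.update_nil_left, PySem.Set.ofList_eq_self_of_nodup _ hnd]
  have gen : ∀ (sks : List String) (d : PySem.Dict String Int), d.keys = races.map Prod.fst →
      (sks.foldl (fun scores sk =>
          races.foldl (fun scores race => scores.insert race.1 (scores.getD race.1 0 + pvPts (PySem.Dict.ofList race.2) sk)) scores) d).keys
        = races.map Prod.fst := by
    intro sks
    induction sks with
    | nil => intro d hd; exact hd
    | cons sk2 r2 ih2 =>
      intro d hd
      simp only [List.foldl_cons]
      refine ih2 _ ?_
      rw [PySem.Dict.keys_foldl_insert_key races Prod.fst _ d, hd]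
      exact pv_update_absorb _ _ (fun y hy => hy)
  exact gen skills _ h0

-- at most one item of a key-nodup pair list carries key s; the indicator sum picks its bonus
lemma pv_pick (l : List (String × Int)) (s : String) (v : Int)
    (hnd : (l.map Prod.fst).Nodup) (hm : (s, v) ∈ l) :
    (l.map (fun p => pvBonus p.2 * (if p.1 = s then (1 : Int) else 0))).sum = pvBonus v := by
  induction l with
  | nil => cases hm
  | cons q rest ih =>
    simp only [List.map_cons, List.nodup_cons] at hnd
    simp only [List.map_cons, List.sum_cons]
    rcases List.mem_cons.mp hm with h | h
    · subst h
      have hz : (rest.map (fun p => pvBonus p.2 * (if p.1 = s then (1 : Int) else 0))).sum = 0 := by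
        apply List.sum_eq_zero
        intro x hx
        rcases List.mem_map.mp hx with ⟨p, hp, he⟩
        have hps : p.1 ≠ s := by
          intro he'
          have hmem := List.mem_map_of_mem (f := Prod.fst) hp
          rw [he'] at hmem
          exact hnd.1 hmem
        simp [← he, hps]
      simp only [hz, add_zero]
      simp
    · have hne : q.1 ≠ s := by
        intro he
        have hmem := List.mem_map_of_mem (f := Prod.fst) h
        rw [← he] at hmem
        exact hnd.1 hmem
      simp only [if_neg hne, mul_zero, zero_add]
      exact ih hnd.2 h

-- the indicator sum over a dict's items is pvBonus of the lookup
lemma pv_item_sum (m : PySem.Dict String Int) (s : String) (hnd : m.keys.Nodup) :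
    (m.items.map (fun p => pvBonus p.2 * (if p.1 = s then (1 : Int) else 0))).sum
      = pvBonus (m.getD s 15) := by
  cases hg : m.get? s with
  | some v =>
    have hm := PySem.Dict.mem_items_of_get?_eq_some m hg
    rw [PySem.Dict.getD_of_get?_eq_some m 15 hg]
    exact pv_pick m.items s v (by simpa [PySem.Dict.keys] using hnd) hm
  | none =>
    rw [PySem.Dict.getD_of_get?_eq_none m 15 hg]
    have hb : pvBonus 15 = 0 := rfl
    rw [hb]
    apply List.sum_eq_zero
    intro x hx
    rcases List.mem_map.mp hx with ⟨p, hp, he⟩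
    have hks : p.1 ≠ s := by
      intro he'
      have hmem := PySem.Dict.mem_keys_of_mem_items m hp
      rw [he'] at hmem
      exact ((PySem.Dict.get?_eq_none_iff_not_mem_keys m s).mp hg) hmem
    simp [← he, hks]

-- the per-skill bonus sum equals the per-item count-weighted bonus sum
lemma pv_bonus_swap (skills : List String) (m : PySem.Dict String Int) (hnd : m.keys.Nodup) :
    (skills.map (fun s => pvBonus (m.getD s 15))).sum
      = (m.items.map (fun p => pvBonus p.2 * (skills.count p.1 : Int))).sum := by
  induction skills with
  | nil =>
    simp only [List.map_nil, List.sum_nil]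
    symm; apply List.sum_eq_zero
    intro x hx
    rcases List.mem_map.mp hx with ⟨p, _, he⟩
    simp [← he]
  | cons s rest ih =>
    simp only [List.map_cons, List.sum_cons]
    have hcnt : ∀ p : String × Int,
        pvBonus p.2 * (((s :: rest).count p.1 : Nat) : Int)
          = pvBonus p.2 * (rest.count p.1 : Int) + pvBonus p.2 * (if p.1 = s then (1 : Int) else 0) := by
      intro p
      rcases eq_or_ne p.1 s with he | hne
      · simp [he, List.count_cons_self]
        ring
      · rw [List.count_cons_of_ne (Ne.symm hne), if_neg hne, mul_zero, add_zero]
    calc pvBonus (m.getD s 15) + (rest.map (fun s => pvBonus (m.getD s 15))).sum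
        = (m.items.map (fun p => pvBonus p.2 * (rest.count p.1 : Int))).sum
            + (m.items.map (fun p => pvBonus p.2 * (if p.1 = s then (1 : Int) else 0))).sum := by
          rw [ih, pv_item_sum m s hnd]; ring
      _ = (m.items.map (fun p => pvBonus p.2 * (((s :: rest).count p.1 : Nat) : Int))).sum := by
          rw [← PySem.List.sum_map_add_int]
          apply congrArg
          apply List.map_congr_left
          intro p _
          rw [hcnt p]
      _ = _ := rfl

-- B's bonus fold computes the count-weighted bonus sum
lemma pv_bonus_fold (skills : List String) (m : PySem.Dict String Int) :
    m.items.foldl (fun (b : Int) p =>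
        if p.2 = 25 then b + 2 * (skills.foldl (fun d s => d.insert s (d.getD s 0 + 1)) PySem.Dict.empty).getD p.1 0
        else if p.2 = 20 then b + (skills.foldl (fun d s => d.insert s (d.getD s 0 + 1)) PySem.Dict.empty).getD p.1 0
        else b) 0
      = (m.items.map (fun p => pvBonus p.2 * (skills.count p.1 : Int))).sum := by
  have hbody : (fun (b : Int) (p : String × Int) =>
      if p.2 = 25 then b + 2 * (skills.foldl (fun d s => d.insert s (d.getD s 0 + 1)) PySem.Dict.empty).getD p.1 0
      else if p.2 = 20 then b + (skills.foldl (fun d s => d.insert s (d.getD s 0 + 1)) PySem.Dict.empty).getD p.1 0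
      else b)
      = fun b p => b + pvBonus p.2 * (skills.count p.1 : Int) := by
    funext b p
    rw [PySem.Dict.getD_foldl_insert_add_one]
    simp only [pvBonus, PySem.Dict.getD_empty]
    split_ifs <;> ring
  rw [hbody, PySem.List.foldl_add m.items (fun p => pvBonus p.2 * (skills.count p.1 : Int)) 0, zero_add]

-- B's score for one race equals the sum of pvPts over the skills
lemma pv_scoreB (skills : List String) (l : List (String × Int)) :
    (skills.length : Int)
      + (PySem.Dict.ofList l).items.foldl (fun (b : Int) p =>
          if p.2 = 25 then b + 2 * (skills.foldl (fun d s => d.insert s (d.getD s 0 + 1)) PySem.Dict.empty).getD p.1 0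
          else if p.2 = 20 then b + (skills.foldl (fun d s => d.insert s (d.getD s 0 + 1)) PySem.Dict.empty).getD p.1 0
          else b) 0
      = (skills.map (pvPts (PySem.Dict.ofList l))).sum := by
  rw [pv_bonus_fold, ← pv_bonus_swap _ _ (PySem.Dict.nodup_keys_ofList l)]
  have : (skills.map (pvPts (PySem.Dict.ofList l)))
      = skills.map (fun s => 1 + pvBonus ((PySem.Dict.ofList l).getD s 15)) := by
    apply List.map_congr_left
    intro s _
    exact pvPts_eq _ s
  rw [this, PySem.List.sum_map_add_int, PySem.List.sum_map_const_int]
  ring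

-- zeta-reduced form of A
lemma pv_A_eq (races : List (String × List (String × Int))) (skills : List String) :
    evaluate_races races skills
      = (skills.foldl (fun scores sk =>
          races.foldl (fun scores race => scores.insert race.1 (scores.getD race.1 0 + pvPts (PySem.Dict.ofList race.2) sk)) scores)
          (races.foldl (fun scores race => scores.insert race.1 (0 : Int)) PySem.Dict.empty)).items := by
  unfold evaluate_races
  have h : (fun (scores : PySem.Dict String Int) (sk : String) =>
      races.foldl (fun scores race =>
        let skill_value := (PySem.Dict.ofList race.2).getD sk 15
        if skill_value = 25 then scores.insert race.1 (scores.getD race.1 0 + 3)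
        else if skill_value = 20 then scores.insert race.1 (scores.getD race.1 0 + 2)
        else scores.insert race.1 (scores.getD race.1 0 + 1)) scores)
    = fun scores sk =>
      races.foldl (fun scores race => scores.insert race.1 (scores.getD race.1 0 + pvPts (PySem.Dict.ofList race.2) sk)) scores := by
    funext d sk
    rw [pv_innerA_eq sk]
  rw [h]

-- B's per-race score as a named function
def pvScoreB (skills : List String) (race : String × List (String × Int)) : Int :=
  (skills.length : Int)
    + (PySem.Dict.ofList race.2).items.foldl (fun (b : Int) p =>
        if p.2 = 25 then b + 2 * (skills.foldl (fun d s => d.insert s (d.getD s 0 + 1)) PySem.Dict.empty).getD p.1 0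
        else if p.2 = 20 then b + (skills.foldl (fun d s => d.insert s (d.getD s 0 + 1)) PySem.Dict.empty).getD p.1 0
        else b) 0

lemma pv_B_eq (races : List (String × List (String × Int))) (skills : List String) :
    evaluate_races_alt races skills
      = (races.foldl (fun scores race => scores.insert race.1 (pvScoreB skills race)) PySem.Dict.empty).items := rfl

-- ===== VERDICT (by name: the statement is the Claim_ definition above) =====
theorem evaluate_races_spec : Claim_equal_evaluate_races := by
  intro races skills _ hnd
  unfold Pre_evaluate_races at hnd
  unfold Spec_evaluate_races
  rw [pv_A_eq, pv_B_eq]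
  rw [PySem.Dict.items_foldl_insert_fresh races (fun race => race.1) (pvScoreB skills) PySem.Dict.empty
        (by intro a _; exact PySem.Dict.contains_empty (ν := Int) a.1) hnd]
  have hk := pv_keys skills races hnd
  have hnodup : (skills.foldl (fun scores sk =>
      races.foldl (fun scores race => scores.insert race.1 (scores.getD race.1 0 + pvPts (PySem.Dict.ofList race.2) sk)) scores)
      (races.foldl (fun scores race => scores.insert race.1 (0 : Int)) PySem.Dict.empty)).keys.Nodup := hk ▸ hnd
  rw [PySem.Dict.items_eq_map_keys _ hnodup 0, hk]
  have hie : (PySem.Dict.empty : PySem.Dict String Int).items = [] := rfl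
  simp only [hie, List.nil_append, List.map_map]
  apply List.map_congr_left
  intro p hp
  simp only [Function.comp]
  have hA := pv_skills skills races (races.foldl (fun scores race => scores.insert race.1 (0 : Int)) PySem.Dict.empty) p hp hnd
  rw [pv_init races _ p hp hnd] at hA
  rw [hA, zero_add, ← pv_scoreB skills p.2]
  rfl
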